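-- pv_equiv track=rewrite | github.com/miliar/Code_Jam_Webscraper | solutions_python/solutions_year17_round0_nr3/2970.py | get_max_min_distances
-- ===== SOURCE A (Python) =====
-- def get_max_min_distances(distances):
--     min_distances = []
--     max_min_distance = 0
--     for left_dist, right_dist in distances:
--         min_distance = min(left_dist, right_dist)
--         min_distances.append(min_distance)
--
--         if min_distance > max_min_distance:
--             max_min_distance = min_distance
--
--     max_min_distance_stalls = []
--     for i in range(len(min_distances)):
--         if min_distances[i] == max_min_distance:
--             max_min_distance_stalls.append(i)
--
--     return max_min_distance_stalls
-- ===== SOURCE B (Python) =====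
-- def get_max_min_distances(distances):
--     best = 0
--     result = []
--     for i, (left_dist, right_dist) in enumerate(distances):
--         m = min(left_dist, right_dist)
--         if m > best:
--             best = m
--             result = [i]
--         elif m == best:
--             result.append(i)
--     return result
-- ===== Notes on version B (the rewrite author's own statement) =====
-- stated objective: simpler
-- what changed: Single pass over enumerate(distances) maintaining the running best and the index list with reset-on-new-max, instead of building an intermediate mins list and re-scanning it by index in a second loop.
import Mathlib
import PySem

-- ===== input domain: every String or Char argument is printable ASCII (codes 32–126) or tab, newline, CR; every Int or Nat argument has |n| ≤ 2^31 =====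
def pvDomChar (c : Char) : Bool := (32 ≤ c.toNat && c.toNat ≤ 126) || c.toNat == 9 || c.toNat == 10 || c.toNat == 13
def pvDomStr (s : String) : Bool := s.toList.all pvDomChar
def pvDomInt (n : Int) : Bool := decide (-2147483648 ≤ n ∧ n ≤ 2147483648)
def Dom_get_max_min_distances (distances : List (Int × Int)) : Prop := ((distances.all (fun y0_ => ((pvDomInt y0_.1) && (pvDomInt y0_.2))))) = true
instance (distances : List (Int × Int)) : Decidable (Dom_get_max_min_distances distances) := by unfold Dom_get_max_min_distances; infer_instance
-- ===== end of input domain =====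

-- B replaces A's two passes (build a mins list, then re-scan it by index) by one pass over
-- enumerate(distances) keeping the running best min and the index list (reset on a new max); simpler.

-- ===== PORT A =====
-- first loop: state = (min_distances, max_min_distance)
-- second loop: min_distances[i] with i from range(len(...)) is always in range, so pyGetD is exact
def get_max_min_distances (distances : List (Int × Int)) : List Int :=
  let st := distances.foldl (fun (acc : List Int × Int) p =>
    let min_distance := min p.1 p.2
    (acc.1 ++ [min_distance],
     if min_distance > acc.2 then min_distance else acc.2)) ([], 0)
  (PySem.List.pyRange 0 st.1.length 1).foldl (fun acc i =>
    if PySem.List.pyGetD st.1 i 0 = st.2 then acc ++ [i] else acc) []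

-- ===== PORT B =====
def get_max_min_distances_alt (distances : List (Int × Int)) : List Int :=
  ((PySem.List.enumerate distances 0).foldl (fun (acc : Int × List Int) ip =>
    let m := min ip.2.1 ip.2.2
    if m > acc.1 then (m, [ip.1])
    else if m = acc.1 then (acc.1, acc.2 ++ [ip.1])
    else acc) (0, [])).2

-- ===== PRECONDITION & SPEC =====
def Spec_get_max_min_distances (distances : List (Int × Int)) (out : List Int) : Prop := out = get_max_min_distances_alt distances
instance (distances : List (Int × Int)) (out : List Int) : Decidable (Spec_get_max_min_distances distances out) := by unfold Spec_get_max_min_distances; infer_instance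

-- ===== CLAIM (what is proved, stated in full; the proofs are below) =====
def Claim_equal_get_max_min_distances : Prop := ∀ (distances : List (Int × Int)), Dom_get_max_min_distances distances → Spec_get_max_min_distances distances (get_max_min_distances distances)

-- ===== LEMMAS AND PROOFS =====

-- the min of each pair
def pvMins (l : List (Int × Int)) : List Int := l.map (fun p => min p.1 p.2)

-- B's step, on an (index, min) pair
def pvStepB (acc : Int × List Int) (q : Int × Int) : Int × List Int :=
  if q.2 > acc.1 then (q.2, [q.1])
  else if q.2 = acc.1 then (acc.1, acc.2 ++ [q.1])
  else acc

-- indices (from an enumeration) whose min equals v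
def pvSel (e : List (Int × Int)) (v : Int) : List Int :=
  (e.filter (fun p => p.2 = v)).map (·.1)

theorem pv_le_foldl_max (l : List Int) (b : Int) : b ≤ l.foldl max b := by
  induction l generalizing b with
  | nil => simp
  | cons m t ih => exact le_trans (le_max_left b m) (ih (max b m))

-- A's first loop
theorem pvA1 (l : List (Int × Int)) (ms0 : List Int) (b : Int) :
    l.foldl (fun (acc : List Int × Int) p =>
      let min_distance := min p.1 p.2
      (acc.1 ++ [min_distance],
       if min_distance > acc.2 then min_distance else acc.2)) (ms0, b)
    = (ms0 ++ pvMins l, (pvMins l).foldl max b) := by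
  induction l generalizing ms0 b with
  | nil => simp [pvMins]
  | cons p t ih =>
      simp only [List.foldl_cons, ih, pvMins, List.map_cons, List.foldl_cons]
      have h : (if min p.1 p.2 > b then min p.1 p.2 else b) = max b (min p.1 p.2) := by
        by_cases h : min p.1 p.2 > b
        · simp [h, max_eq_right (le_of_lt h)]
        · simp [h, max_eq_left (le_of_not_gt h)]
      rw [Prod.mk.injEq]
      exact ⟨by simp, by rw [h]⟩

-- A's second loop equals pvSel of the enumeration
theorem pvA2 (ms : List Int) (v : Int) :
    (PySem.List.pyRange 0 ms.length 1).foldl (fun acc i =>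
      if PySem.List.pyGetD ms i 0 = v then acc ++ [i] else acc) []
    = pvSel (PySem.List.enumerate ms 0) v := by
  rw [PySem.List.foldl_append_ite_eq_filter]
  rw [pvSel, PySem.List.enumerate_eq_map_pyRange ms 0]
  rw [List.filter_map, List.map_map]
  simp [PySem.List.len_eq, Function.comp_def]

-- B's loop invariant
theorem pvB (e : List (Int × Int)) (b : Int) (r : List Int) :
    e.foldl pvStepB (b, r)
    = ((e.map (·.2)).foldl max b,
       (if b < (e.map (·.2)).foldl max b then [] else r)
         ++ pvSel e ((e.map (·.2)).foldl max b)) := by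
  induction e generalizing b r with
  | nil => simp [pvSel]
  | cons q t ih =>
      have hle : max b q.2 ≤ (t.map (·.2)).foldl max (max b q.2) :=
        pv_le_foldl_max _ _
      simp only [List.foldl_cons, List.map_cons]
      by_cases h1 : q.2 > b
      · rw [show pvStepB (b, r) q = (q.2, [q.1]) by simp [pvStepB, h1]]
        rw [ih]
        have hmax : max b q.2 = q.2 := max_eq_right (le_of_lt h1)
        simp only [hmax] at hle ⊢
        have hb : b < (t.map (·.2)).foldl max q.2 := lt_of_lt_of_le h1 hle
        rw [if_pos hb]
        by_cases h2 : q.2 < (t.map (·.2)).foldl max q.2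
        · rw [if_pos h2]
          have : ¬ (q.2 = (t.map (·.2)).foldl max q.2) := ne_of_lt h2
          simp [pvSel, this]
        · rw [if_neg h2]
          have heq : q.2 = (t.map (·.2)).foldl max q.2 := le_antisymm hle (le_of_not_gt h2)
          simp [pvSel, ← heq]
      · have hmax : max b q.2 = b := max_eq_left (le_of_not_gt h1)
        simp only [hmax] at hle ⊢
        by_cases h2 : q.2 = b
        · rw [show pvStepB (b, r) q = (b, r ++ [q.1]) by simp [pvStepB, h2]]
          rw [ih]
          by_cases h3 : b < (t.map (·.2)).foldl max b
          · rw [if_pos h3, if_pos h3]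
            have : ¬ (q.2 = (t.map (·.2)).foldl max b) := by rw [h2]; exact ne_of_lt h3
            simp [pvSel, this]
          · rw [if_neg h3, if_neg h3]
            have heq : b = (t.map (·.2)).foldl max b := le_antisymm hle (le_of_not_gt h3)
            have : q.2 = (t.map (·.2)).foldl max b := by rw [h2]; exact heq
            simp [pvSel, this]
        · rw [show pvStepB (b, r) q = (b, r) by simp [pvStepB, h1, h2]]
          rw [ih]
          have hq : q.2 < b := lt_of_le_of_ne (le_of_not_gt h1) h2
          have : ¬ (q.2 = (t.map (·.2)).foldl max b) :=
            ne_of_lt (lt_of_lt_of_le hq hle)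
          simp [pvSel, this]

-- snd of an enumeration of a mapped list
theorem pv_enum_map_snd (l : List (Int × Int)) (n : Int) :
    (PySem.List.enumerate l n).map (fun ip => (ip.1, min ip.2.1 ip.2.2))
    = PySem.List.enumerate (pvMins l) n := by
  induction l generalizing n with
  | nil => simp [pvMins, PySem.List.enumerate_nil]
  | cons p t ih => simp [pvMins, PySem.List.enumerate_cons, ih]

theorem pvB_eq (l : List (Int × Int)) :
    get_max_min_distances_alt l
    = pvSel (PySem.List.enumerate (pvMins l) 0) ((pvMins l).foldl max 0) := by
  unfold get_max_min_distances_alt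
  have hstep : (PySem.List.enumerate l 0).foldl (fun (acc : Int × List Int) ip =>
      let m := min ip.2.1 ip.2.2
      if m > acc.1 then (m, [ip.1])
      else if m = acc.1 then (acc.1, acc.2 ++ [ip.1])
      else acc) (0, [])
    = ((PySem.List.enumerate l 0).map (fun ip => (ip.1, min ip.2.1 ip.2.2))).foldl pvStepB (0, []) := by
    rw [List.foldl_map]
    rfl
  rw [hstep, pv_enum_map_snd, pvB]
  have hsnd : (PySem.List.enumerate (pvMins l) 0).map (·.2) = pvMins l :=
    PySem.List.map_snd_enumerate _ _
  rw [hsnd]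
  split_ifs <;> simp

-- ===== VERDICT (by name: the statement is the Claim_ definition above) =====
theorem get_max_min_distances_spec : Claim_equal_get_max_min_distances := by
  intro distances _
  unfold Spec_get_max_min_distances
  unfold get_max_min_distances
  simp only [pvA1, List.nil_append]
  rw [pvA2, pvB_eq]
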